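-- pv_equiv track=rewrite | github.com/Darshankhnvr/Plant-Disease-Detection-using-ML | yield_predictor.py | extract_crop_type
-- ===== SOURCE A (Python) =====
-- def extract_crop_type(disease_name):
--     """Extract crop type from disease name"""
--     crop_mapping = {
--         'Apple___': 'Apple',
--         'Tomato___': 'Tomato',
--         'Corn___': 'Corn',
--         'Potato___': 'Potato',
--         'Grape___': 'Grape',
--         'Pepper,_bell___': 'Pepper',
--         'Peach___': 'Peach',
--         'Orange___': 'Orange',
--         'Strawberry___': 'Strawberry',
--         'Blueberry___': 'Blueberry',
--         'Cherry___': 'Cherry',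
--         'Soybean___': 'Soybean',
--         'Squash___': 'Squash',
--         'Raspberry___': 'Raspberry'
--     }
--
--     for key, crop in crop_mapping.items():
--         if disease_name.startswith(key):
--             return crop
--     return 'Unknown'
-- ===== SOURCE B (Python) =====
-- _CROPS = {
--     'Apple': 'Apple',
--     'Tomato': 'Tomato',
--     'Corn': 'Corn',
--     'Potato': 'Potato',
--     'Grape': 'Grape',
--     'Pepper,_bell': 'Pepper',
--     'Peach': 'Peach',
--     'Orange': 'Orange',
--     'Strawberry': 'Strawberry',
--     'Blueberry': 'Blueberry',
--     'Cherry': 'Cherry',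
--     'Soybean': 'Soybean',
--     'Squash': 'Squash',
--     'Raspberry': 'Raspberry',
-- }
--
-- def extract_crop_type(disease_name):
--     """Extract crop type from disease name"""
--     i = disease_name.find('___')
--     if i < 0:
--         return 'Unknown'
--     return _CROPS.get(disease_name[:i], 'Unknown')
-- ===== Notes on version B (the rewrite author's own statement) =====
-- stated objective: idiomatic
-- what changed: A scans 14 'crop___' keys with startswith until one matches; B instead tokenises once with find('___'), takes the prefix before the first '___' and does a single dict lookup of that prefix (default 'Unknown').
import Mathlib
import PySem

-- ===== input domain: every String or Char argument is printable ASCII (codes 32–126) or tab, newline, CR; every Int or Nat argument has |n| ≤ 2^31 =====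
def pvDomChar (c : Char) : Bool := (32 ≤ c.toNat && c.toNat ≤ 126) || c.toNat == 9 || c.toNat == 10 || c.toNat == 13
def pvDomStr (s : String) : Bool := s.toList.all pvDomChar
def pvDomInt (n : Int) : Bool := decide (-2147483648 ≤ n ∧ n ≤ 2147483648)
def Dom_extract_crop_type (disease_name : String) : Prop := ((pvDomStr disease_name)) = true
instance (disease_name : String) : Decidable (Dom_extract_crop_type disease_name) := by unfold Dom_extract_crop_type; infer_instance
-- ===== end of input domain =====

-- B replaces A's linear startswith scan over the 14 keys by one find('___') tokenisation and a
-- single dict lookup of the prefix (objective: idiomatic/alternative; same observable results).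

-- ===== PORT A =====
-- A's crop_mapping dict, as an association list in insertion order (its keys are distinct)
def pvCropMapping : List (List Char × String) :=
  [(['A','p','p','l','e','_','_','_'], "Apple"),
   (['T','o','m','a','t','o','_','_','_'], "Tomato"),
   (['C','o','r','n','_','_','_'], "Corn"),
   (['P','o','t','a','t','o','_','_','_'], "Potato"),
   (['G','r','a','p','e','_','_','_'], "Grape"),
   (['P','e','p','p','e','r',',','_','b','e','l','l','_','_','_'], "Pepper"),
   (['P','e','a','c','h','_','_','_'], "Peach"),
   (['O','r','a','n','g','e','_','_','_'], "Orange"),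
   (['S','t','r','a','w','b','e','r','r','y','_','_','_'], "Strawberry"),
   (['B','l','u','e','b','e','r','r','y','_','_','_'], "Blueberry"),
   (['C','h','e','r','r','y','_','_','_'], "Cherry"),
   (['S','o','y','b','e','a','n','_','_','_'], "Soybean"),
   (['S','q','u','a','s','h','_','_','_'], "Squash"),
   (['R','a','s','p','b','e','r','r','y','_','_','_'], "Raspberry")]

-- A's "for key, crop in crop_mapping.items(): if disease_name.startswith(key): return crop"
def pvScanA : List (List Char × String) → List Char → String
  | [], _ => "Unknown"
  | (key, crop) :: rest, s =>
      if PySem.Chars.startswith s key then crop else pvScanA rest s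

def extract_crop_type (disease_name : String) : String :=
  pvScanA pvCropMapping disease_name.toList

-- ===== PORT B =====
-- B's module-level _CROPS dict (distinct keys)
def pvCropsB : PySem.Dict (List Char) String :=
  PySem.Dict.ofList
  [(['A','p','p','l','e'], "Apple"),
   (['T','o','m','a','t','o'], "Tomato"),
   (['C','o','r','n'], "Corn"),
   (['P','o','t','a','t','o'], "Potato"),
   (['G','r','a','p','e'], "Grape"),
   (['P','e','p','p','e','r',',','_','b','e','l','l'], "Pepper"),
   (['P','e','a','c','h'], "Peach"),
   (['O','r','a','n','g','e'], "Orange"),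
   (['S','t','r','a','w','b','e','r','r','y'], "Strawberry"),
   (['B','l','u','e','b','e','r','r','y'], "Blueberry"),
   (['C','h','e','r','r','y'], "Cherry"),
   (['S','o','y','b','e','a','n'], "Soybean"),
   (['S','q','u','a','s','h'], "Squash"),
   (['R','a','s','p','b','e','r','r','y'], "Raspberry")]

-- B: i = disease_name.find('___'); 'Unknown' if i < 0 else _CROPS.get(disease_name[:i], 'Unknown')
def pvAltChars (s : List Char) : String :=
  let i := PySem.Chars.find s ['_','_','_']
  if i < 0 then "Unknown"
  else PySem.Dict.getD pvCropsB (PySem.Chars.slice s none (some i)) "Unknown"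

def extract_crop_type_alt (disease_name : String) : String :=
  pvAltChars disease_name.toList

-- ===== PRECONDITION & SPEC =====
def Spec_extract_crop_type (disease_name : String) (out : String) : Prop := out = extract_crop_type_alt disease_name
instance (disease_name : String) (out : String) : Decidable (Spec_extract_crop_type disease_name out) := by unfold Spec_extract_crop_type; infer_instance

-- ===== CLAIM (what is proved, stated in full; the proofs are below) =====
def Claim_equal_extract_crop_type : Prop := ∀ (disease_name : String), Dom_extract_crop_type disease_name → Spec_extract_crop_type disease_name (extract_crop_type disease_name)

-- ===== LEMMAS AND PROOFS =====

-- if every key of the scan fails, A's loop falls through to 'Unknown'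
theorem pvScan_unknown : ∀ (L : List (List Char × String)) (s : List Char),
    (∀ p ∈ L, PySem.Chars.startswith s p.1 = false) → pvScanA L s = "Unknown"
  | [], _, _ => rfl
  | (key, crop) :: rest, s, h => by
      simp only [pvScanA]
      rw [h (key, crop) (by simp)]
      simp only [Bool.false_eq_true, if_false]
      exact pvScan_unknown rest s (fun p hp => h p (List.mem_cons_of_mem _ hp))

-- a key containing '___' cannot be a prefix of a string with no '___' occurrence
theorem pvSw_false (s k : List Char) (hU : ['_','_','_'] <:+: k)
    (hni : ¬ ['_','_','_'] <:+: s) : PySem.Chars.startswith s k = false := by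
  cases hb : PySem.Chars.startswith s k with
  | false => rfl
  | true =>
      exact absurd (hU.trans ((PySem.Chars.startswith_iff _ _).mp hb).isInfix) hni

-- a prefix that fits inside the first block of an append is a prefix of that block
theorem pvPrefix_append_left {α : Type} (u a b : List α) (h : u <+: a ++ b)
    (hlen : u.length ≤ a.length) : u <+: a := by
  have hu : u = (a ++ b).take u.length := List.prefix_iff_eq_take.mp h
  rw [List.take_append_of_le_length hlen] at hu
  exact hu ▸ List.take_prefix _ _

-- core fact: when n is the FIRST occurrence of '___' in s, a key ck ++ '___' (with no '___'
-- inside ck ++ '__') is a prefix of s exactly when ck is the part of s before position n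
theorem pvFirstMatch (s ck : List Char) (n : Nat)
    (hno : ¬ ['_','_','_'] <:+: (ck ++ ['_','_']))
    (hocc : ['_','_','_'] <+: s.drop n)
    (hmin : ∀ j < n, ¬ ['_','_','_'] <+: s.drop j) :
    PySem.Chars.startswith s (ck ++ ['_','_','_']) = (s.take n == ck) := by
  rw [Bool.eq_iff_iff, PySem.Chars.startswith_iff, beq_iff_eq]
  constructor
  · intro hpre
    obtain ⟨t, ht⟩ := hpre
    have hs : s = ck ++ (['_','_','_'] ++ t) := by rw [← ht, List.append_assoc]
    have hocc2 : ['_','_','_'] <+: s.drop ck.length := by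
      rw [hs, List.drop_append_of_le_length (le_refl _), List.drop_length,
        List.nil_append]
      exact ⟨t, rfl⟩
    have hle : n ≤ ck.length := by
      by_contra hc
      exact hmin ck.length (by omega) hocc2
    have hge : ck.length ≤ n := by
      by_contra hco
      have hc : n < ck.length := by omega
      apply hno
      have hdrop : s.drop n = (ck.drop n ++ ['_','_']) ++ ('_' :: t) := by
        rw [hs, List.drop_append_of_le_length (le_of_lt hc)]
        simp
      have h3 : (['_','_','_'] : List Char).length ≤ (ck.drop n ++ ['_','_']).length := by
        simp only [List.length_append, List.length_drop, List.length_cons,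
          List.length_nil]
        omega
      have hpre3 : ['_','_','_'] <+: (ck.drop n ++ ['_','_']) :=
        pvPrefix_append_left _ _ _ (hdrop ▸ hocc) h3
      have hsuf : (ck.drop n ++ ['_','_']) <:+ (ck ++ ['_','_']) := by
        have hd : (ck ++ (['_','_'] : List Char)).drop n = ck.drop n ++ ['_','_'] := by
          rw [List.drop_append_of_le_length (le_of_lt hc)]
        exact hd ▸ List.drop_suffix n _
      exact hpre3.isInfix.trans hsuf.isInfix
    have hn : n = ck.length := le_antisymm hle hge
    rw [hn, hs, List.take_append_of_le_length (le_refl _), List.take_length]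
  · intro htake
    obtain ⟨t, ht⟩ := hocc
    exact ⟨t, by rw [← htake, List.append_assoc, ht, List.take_append_drop]⟩

-- B's dict lookup, written out as the first-match chain over its 14 distinct keys
theorem pvLookup (a : List Char) :
    PySem.Dict.getD pvCropsB a "Unknown" =
    (if a == ['A','p','p','l','e'] then "Apple"
    else if a == ['T','o','m','a','t','o'] then "Tomato"
    else if a == ['C','o','r','n'] then "Corn"
    else if a == ['P','o','t','a','t','o'] then "Potato"
    else if a == ['G','r','a','p','e'] then "Grape"
    else if a == ['P','e','p','p','e','r',',','_','b','e','l','l'] then "Pepper"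
    else if a == ['P','e','a','c','h'] then "Peach"
    else if a == ['O','r','a','n','g','e'] then "Orange"
    else if a == ['S','t','r','a','w','b','e','r','r','y'] then "Strawberry"
    else if a == ['B','l','u','e','b','e','r','r','y'] then "Blueberry"
    else if a == ['C','h','e','r','r','y'] then "Cherry"
    else if a == ['S','o','y','b','e','a','n'] then "Soybean"
    else if a == ['S','q','u','a','s','h'] then "Squash"
    else if a == ['R','a','s','p','b','e','r','r','y'] then "Raspberry"
    else "Unknown") := by
  by_cases h1 : a = ['A','p','p','l','e']
  · subst h1; rfl
  by_cases h2 : a = ['T','o','m','a','t','o']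
  · subst h2; rfl
  by_cases h3 : a = ['C','o','r','n']
  · subst h3; rfl
  by_cases h4 : a = ['P','o','t','a','t','o']
  · subst h4; rfl
  by_cases h5 : a = ['G','r','a','p','e']
  · subst h5; rfl
  by_cases h6 : a = ['P','e','p','p','e','r',',','_','b','e','l','l']
  · subst h6; rfl
  by_cases h7 : a = ['P','e','a','c','h']
  · subst h7; rfl
  by_cases h8 : a = ['O','r','a','n','g','e']
  · subst h8; rfl
  by_cases h9 : a = ['S','t','r','a','w','b','e','r','r','y']
  · subst h9; rfl
  by_cases h10 : a = ['B','l','u','e','b','e','r','r','y']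
  · subst h10; rfl
  by_cases h11 : a = ['C','h','e','r','r','y']
  · subst h11; rfl
  by_cases h12 : a = ['S','o','y','b','e','a','n']
  · subst h12; rfl
  by_cases h13 : a = ['S','q','u','a','s','h']
  · subst h13; rfl
  by_cases h14 : a = ['R','a','s','p','b','e','r','r','y']
  · subst h14; rfl
  rw [PySem.Dict.getD_of_not_contains]
  · simp [h1, h2, h3, h4, h5, h6, h7, h8, h9, h10, h11, h12, h13, h14]
  · rw [PySem.Dict.contains_eq_decide_mem_keys]
    have hk : (PySem.Dict.keys pvCropsB) =
        [['A','p','p','l','e'], ['T','o','m','a','t','o'], ['C','o','r','n'], ['P','o','t','a','t','o'], ['G','r','a','p','e'], ['P','e','p','p','e','r',',','_','b','e','l','l'], ['P','e','a','c','h'], ['O','r','a','n','g','e'], ['S','t','r','a','w','b','e','r','r','y'], ['B','l','u','e','b','e','r','r','y'], ['C','h','e','r','r','y'], ['S','o','y','b','e','a','n'], ['S','q','u','a','s','h'], ['R','a','s','p','b','e','r','r','y']] := rfl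
    rw [hk]
    simp [h1, h2, h3, h4, h5, h6, h7, h8, h9, h10, h11, h12, h13, h14]

-- the two programs agree on every string of characters
theorem pvMain (s : List Char) : pvScanA pvCropMapping s = pvAltChars s := by
  unfold pvAltChars
  by_cases hneg : PySem.Chars.find s ['_','_','_'] < 0
  · rw [if_pos hneg]
    have h1 := PySem.Chars.neg_one_le_find s ['_','_','_']
    have heq : PySem.Chars.find s ['_','_','_'] = -1 := by omega
    have hni : ¬ ['_','_','_'] <:+: s := (PySem.Chars.find_eq_neg_one_iff s ['_','_','_']).mp heq
    apply pvScan_unknown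
    intro p hp
    refine pvSw_false s p.1 ?_ hni
    have hall : ∀ p ∈ pvCropMapping, ['_','_','_'] <:+: p.1 := by decide
    exact hall p hp
  · have hpos : 0 ≤ PySem.Chars.find s ['_','_','_'] := by omega
    rw [if_neg (by omega)]
    obtain ⟨hocc, hmin⟩ := PySem.Chars.find_spec hpos
    rw [PySem.Chars.slice_eq_listSlice, PySem.List.slice_to _ hpos, pvLookup]
    set n := (PySem.Chars.find s ['_','_','_']).toNat with hn
    have hs1 : PySem.Chars.startswith s (['A','p','p','l','e','_','_','_']) = (s.take n == ['A','p','p','l','e']) := by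
      rw [show (['A','p','p','l','e','_','_','_'] : List Char) = ['A','p','p','l','e'] ++ ['_','_','_'] from rfl]
      exact pvFirstMatch s _ n (by decide) hocc hmin
    have hs2 : PySem.Chars.startswith s (['T','o','m','a','t','o','_','_','_']) = (s.take n == ['T','o','m','a','t','o']) := by
      rw [show (['T','o','m','a','t','o','_','_','_'] : List Char) = ['T','o','m','a','t','o'] ++ ['_','_','_'] from rfl]
      exact pvFirstMatch s _ n (by decide) hocc hmin
    have hs3 : PySem.Chars.startswith s (['C','o','r','n','_','_','_']) = (s.take n == ['C','o','r','n']) := by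
      rw [show (['C','o','r','n','_','_','_'] : List Char) = ['C','o','r','n'] ++ ['_','_','_'] from rfl]
      exact pvFirstMatch s _ n (by decide) hocc hmin
    have hs4 : PySem.Chars.startswith s (['P','o','t','a','t','o','_','_','_']) = (s.take n == ['P','o','t','a','t','o']) := by
      rw [show (['P','o','t','a','t','o','_','_','_'] : List Char) = ['P','o','t','a','t','o'] ++ ['_','_','_'] from rfl]
      exact pvFirstMatch s _ n (by decide) hocc hmin
    have hs5 : PySem.Chars.startswith s (['G','r','a','p','e','_','_','_']) = (s.take n == ['G','r','a','p','e']) := by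
      rw [show (['G','r','a','p','e','_','_','_'] : List Char) = ['G','r','a','p','e'] ++ ['_','_','_'] from rfl]
      exact pvFirstMatch s _ n (by decide) hocc hmin
    have hs6 : PySem.Chars.startswith s (['P','e','p','p','e','r',',','_','b','e','l','l','_','_','_']) = (s.take n == ['P','e','p','p','e','r',',','_','b','e','l','l']) := by
      rw [show (['P','e','p','p','e','r',',','_','b','e','l','l','_','_','_'] : List Char) = ['P','e','p','p','e','r',',','_','b','e','l','l'] ++ ['_','_','_'] from rfl]
      exact pvFirstMatch s _ n (by decide) hocc hmin
    have hs7 : PySem.Chars.startswith s (['P','e','a','c','h','_','_','_']) = (s.take n == ['P','e','a','c','h']) := by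
      rw [show (['P','e','a','c','h','_','_','_'] : List Char) = ['P','e','a','c','h'] ++ ['_','_','_'] from rfl]
      exact pvFirstMatch s _ n (by decide) hocc hmin
    have hs8 : PySem.Chars.startswith s (['O','r','a','n','g','e','_','_','_']) = (s.take n == ['O','r','a','n','g','e']) := by
      rw [show (['O','r','a','n','g','e','_','_','_'] : List Char) = ['O','r','a','n','g','e'] ++ ['_','_','_'] from rfl]
      exact pvFirstMatch s _ n (by decide) hocc hmin
    have hs9 : PySem.Chars.startswith s (['S','t','r','a','w','b','e','r','r','y','_','_','_']) = (s.take n == ['S','t','r','a','w','b','e','r','r','y']) := by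
      rw [show (['S','t','r','a','w','b','e','r','r','y','_','_','_'] : List Char) = ['S','t','r','a','w','b','e','r','r','y'] ++ ['_','_','_'] from rfl]
      exact pvFirstMatch s _ n (by decide) hocc hmin
    have hs10 : PySem.Chars.startswith s (['B','l','u','e','b','e','r','r','y','_','_','_']) = (s.take n == ['B','l','u','e','b','e','r','r','y']) := by
      rw [show (['B','l','u','e','b','e','r','r','y','_','_','_'] : List Char) = ['B','l','u','e','b','e','r','r','y'] ++ ['_','_','_'] from rfl]
      exact pvFirstMatch s _ n (by decide) hocc hmin
    have hs11 : PySem.Chars.startswith s (['C','h','e','r','r','y','_','_','_']) = (s.take n == ['C','h','e','r','r','y']) := by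
      rw [show (['C','h','e','r','r','y','_','_','_'] : List Char) = ['C','h','e','r','r','y'] ++ ['_','_','_'] from rfl]
      exact pvFirstMatch s _ n (by decide) hocc hmin
    have hs12 : PySem.Chars.startswith s (['S','o','y','b','e','a','n','_','_','_']) = (s.take n == ['S','o','y','b','e','a','n']) := by
      rw [show (['S','o','y','b','e','a','n','_','_','_'] : List Char) = ['S','o','y','b','e','a','n'] ++ ['_','_','_'] from rfl]
      exact pvFirstMatch s _ n (by decide) hocc hmin
    have hs13 : PySem.Chars.startswith s (['S','q','u','a','s','h','_','_','_']) = (s.take n == ['S','q','u','a','s','h']) := by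
      rw [show (['S','q','u','a','s','h','_','_','_'] : List Char) = ['S','q','u','a','s','h'] ++ ['_','_','_'] from rfl]
      exact pvFirstMatch s _ n (by decide) hocc hmin
    have hs14 : PySem.Chars.startswith s (['R','a','s','p','b','e','r','r','y','_','_','_']) = (s.take n == ['R','a','s','p','b','e','r','r','y']) := by
      rw [show (['R','a','s','p','b','e','r','r','y','_','_','_'] : List Char) = ['R','a','s','p','b','e','r','r','y'] ++ ['_','_','_'] from rfl]
      exact pvFirstMatch s _ n (by decide) hocc hmin
    simp only [pvScanA, pvCropMapping, hs1, hs2, hs3, hs4, hs5, hs6, hs7, hs8, hs9, hs10, hs11, hs12, hs13, hs14]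

-- ===== VERDICT (by name: the statement is the Claim_ definition above) =====
theorem extract_crop_type_spec : Claim_equal_extract_crop_type := by
  intro disease_name _
  unfold Spec_extract_crop_type extract_crop_type extract_crop_type_alt
  exact pvMain disease_name.toList
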